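-- pv_equiv track=rewrite | github.com/Teatot/Advent-of-Code-Solutions | day 10 Part 1 & 2.py | DayOne
-- ===== SOURCE A (Python) =====
-- def Check_End (sym, q):
--     braces = {")":"(", "]":"[", "}":"{", ">":"<"}
--
--     if sym in ("(", "[", "{", "<"):
--         q.append(sym)
--         return
--
--     if q[-1] == braces[sym]:
--         q.pop()
--         return
--
--     q.append(sym)
--
-- def DayOne (lines):
--     wrg_end = 0
--     points = {")":3, "]":57, "}":1197, ">":25137}
--     for code in lines:
--         lst = []
--         for sym in code:
--             Check_End (sym, lst)
--         for it in lst: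
--             if it in (")", "]", "}", ">"):
--                 wrg_end += points[it]
--                 break
--     return wrg_end
-- ===== SOURCE B (Python) =====
-- def DayOne(lines):
--     points = {")": 3, "]": 57, "}": 1197, ">": 25137}
--     pairs = {")": "(", "]": "[", "}": "{", ">": "<"}
--     total = 0
--     for code in lines:
--         stack = []
--         for sym in code:
--             if sym in "([{<":
--                 stack.append(sym)
--             elif stack[-1] == pairs[sym]:
--                 stack.pop()
--             else:
--                 total += points[sym]
--                 break
--     return total
-- ===== Notes on version B (the rewrite author's own statement) =====
-- stated objective: simpler
-- what changed: B replaces A's record-then-scan structure (Check_End helper that pushes mismatched closers onto the stack, plus a second post-loop scan of the stack for the first closer) with a single early-exiting pass that scores the first corrupting closer and breaks immediately.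
import Mathlib
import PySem

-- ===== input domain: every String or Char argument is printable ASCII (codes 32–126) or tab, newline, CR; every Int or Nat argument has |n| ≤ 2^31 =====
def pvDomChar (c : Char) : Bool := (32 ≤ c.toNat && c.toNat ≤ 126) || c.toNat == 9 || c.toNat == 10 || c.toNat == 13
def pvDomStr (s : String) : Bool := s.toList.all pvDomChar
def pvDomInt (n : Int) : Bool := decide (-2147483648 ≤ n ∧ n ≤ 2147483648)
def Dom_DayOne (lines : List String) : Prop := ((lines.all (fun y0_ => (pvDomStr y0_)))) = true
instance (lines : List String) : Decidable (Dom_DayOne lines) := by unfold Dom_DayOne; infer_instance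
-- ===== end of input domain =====

-- B replaces A's record-then-scan structure (push mismatched closers, then rescan the final
-- stack for the first closer) with a single early-exiting pass per line (objective: simpler).

-- ===== PORT A =====
-- braces[sym]: some = the matching opener, none = KeyError
def pvBracesA (sym : Char) : Option Char :=
  if sym = ')' then some '(' else if sym = ']' then some '[' else
  if sym = '}' then some '{' else if sym = '>' then some '<' else none

def pvIsOpenA (sym : Char) : Bool := sym = '(' || sym = '[' || sym = '{' || sym = '<'

-- Check_End: q[-1] on an empty list is IndexError, braces[sym] may be KeyError → Option
def checkEnd (sym : Char) (q : List Char) : Option (List Char) :=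
  if pvIsOpenA sym then some (q ++ [sym])
  else
    match q.getLast? with
    | none => none
    | some t =>
      match pvBracesA sym with
      | none => none
      | some b => if t = b then some q.dropLast else some (q ++ [sym])

def pvIsCloseA (it : Char) : Bool := it = ')' || it = ']' || it = '}' || it = '>'

def pvPointsA (it : Char) : Int :=
  if it = ')' then 3 else if it = ']' then 57 else if it = '}' then 1197 else
  if it = '>' then 25137 else 0

-- the post-loop 'for it in lst: … break' scan
def scanCloseA : List Char → Int
  | [] => 0
  | it :: rest => if pvIsCloseA it then pvPointsA it else scanCloseA rest

-- none (an exception) is excluded by Pre_; the 0 default there is never reached under Pre_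
def lineA (code : List Char) : Int :=
  match code.foldl (fun acc sym => acc.bind (checkEnd sym)) (some []) with
  | none => 0
  | some lst => scanCloseA lst

def DayOne (lines : List String) : Int :=
  lines.foldl (fun wrg_end code => wrg_end + lineA code.toList) 0

-- ===== PORT B =====
def pvPairsB (sym : Char) : Option Char :=
  if sym = ')' then some '(' else if sym = ']' then some '[' else
  if sym = '}' then some '{' else if sym = '>' then some '<' else none

def pvPointsB (sym : Char) : Int :=
  if sym = ')' then 3 else if sym = ']' then 57 else if sym = '}' then 1197 else
  if sym = '>' then 25137 else 0

-- one early-exiting pass; stack top at the head; [] at a closer = IndexError (outside Pre_)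
def lineB : List Char → List Char → Int
  | [], _ => 0
  | sym :: rest, stack =>
    if sym = '(' || sym = '[' || sym = '{' || sym = '<' then lineB rest (sym :: stack)
    else
      match stack with
      | [] => 0
      | t :: stack' =>
        match pvPairsB sym with
        | none => 0
        | some p => if t = p then lineB rest stack' else pvPointsB sym

def DayOne_alt (lines : List String) : Int :=
  lines.foldl (fun total code => total + lineB code.toList []) 0

-- ===== PRECONDITION & SPEC =====
def preOpen (c : Char) : Bool := c = '(' || c = '[' || c = '{' || c = '<'
def preClose (c : Char) : Bool := c = ')' || c = ']' || c = '}' || c = '>'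
def preMatch (c : Char) : Char :=
  if c = ')' then '(' else if c = ']' then '[' else if c = '}' then '{' else '<'
def preBr (c : Char) : Bool := preOpen c || preClose c

-- safe = the line raises no exception in A: every char is one of the eight bracket chars,
-- no closer meets an empty stack, and after the first corrupting closer only bracket chars follow
def safeLine : List Char → List Char → Bool
  | [], _ => true
  | sym :: rest, stk =>
    if preOpen sym then safeLine rest (sym :: stk)
    else if preClose sym then
      match stk with
      | [] => false
      | t :: stk' => if t = preMatch sym then safeLine rest stk' else rest.all preBr
    else false

-- Pre_ excludes exactly the inputs on which A raises (IndexError or KeyError)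
def Pre_DayOne (lines : List String) : Prop := ∀ code ∈ lines, safeLine code.toList [] = true
instance (lines : List String) : Decidable (Pre_DayOne lines) := by unfold Pre_DayOne; infer_instance

def pvWitness_DayOne : List String := ["<([]){()}[{}]", "(]", "{([(<{}[<>[]}>{[]{[(<()>"]

def Spec_DayOne (lines : List String) (out : Int) : Prop := out = DayOne_alt lines
instance (lines : List String) (out : Int) : Decidable (Spec_DayOne lines out) := by unfold Spec_DayOne; infer_instance

-- ===== CLAIM (what is proved, stated in full; the proofs are below) =====
def Claim_equal_DayOne : Prop := ∀ (lines : List String), Dom_DayOne lines → Pre_DayOne lines → Spec_DayOne lines (DayOne lines)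
-- ===== LEMMAS AND PROOFS =====

lemma open_not_closeA (c : Char) (h : preOpen c = true) : pvIsCloseA c = false := by
  simp [preOpen] at h
  rcases h with ((h | h) | h) | h <;> subst h <;> decide

lemma close_isCloseA (c : Char) (h : preClose c = true) : pvIsCloseA c = true := by
  simp [preClose] at h
  rcases h with ((h | h) | h) | h <;> subst h <;> decide

lemma close_not_openA (c : Char) (h : preClose c = true) : pvIsOpenA c = false := by
  simp [preClose] at h
  rcases h with ((h | h) | h) | h <;> subst h <;> decide

lemma open_isOpenA (c : Char) (h : preOpen c = true) : pvIsOpenA c = true := by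
  simp [preOpen] at h
  rcases h with ((h | h) | h) | h <;> subst h <;> decide

lemma bracesA_of_close (c : Char) (h : preClose c = true) : pvBracesA c = some (preMatch c) := by
  simp [preClose] at h
  rcases h with ((h | h) | h) | h <;> subst h <;> decide

lemma pairsB_of_close (c : Char) (h : preClose c = true) : pvPairsB c = some (preMatch c) := by
  simp [preClose] at h
  rcases h with ((h | h) | h) | h <;> subst h <;> decide

lemma preMatch_open (c : Char) (h : preClose c = true) : preOpen (preMatch c) = true := by
  simp [preClose] at h
  rcases h with ((h | h) | h) | h <;> subst h <;> decide

lemma close_ne_open (c b : Char) (hc : preClose c = true) (hb : preOpen b = true) : c ≠ b := by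
  intro he; subst he
  simp [preClose] at hc
  rcases hc with ((h | h) | h) | h <;> subst h <;> simp [preOpen] at hb

-- scanning all-opener prefix skips it
lemma scanCloseA_openers (q : List Char) (hq : ∀ x ∈ q, preOpen x = true) :
    ∀ (c : Char) (s : List Char), preClose c = true → scanCloseA (q ++ c :: s) = pvPointsA c := by
  induction q with
  | nil => intro c s hc; simp [scanCloseA, close_isCloseA c hc]
  | cons x q ih =>
    intro c s hc
    have hx : preOpen x = true := hq x (by simp)
    simp only [List.cons_append, scanCloseA, open_not_closeA x hx, Bool.false_eq_true, if_false]
    exact ih (fun y hy => hq y (by simp [hy])) c s hc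

lemma scanCloseA_all_openers (q : List Char) (hq : ∀ x ∈ q, preOpen x = true) :
    scanCloseA q = 0 := by
  induction q with
  | nil => rfl
  | cons x q ih =>
    have hx : preOpen x = true := hq x (by simp)
    simp only [scanCloseA, open_not_closeA x hx, Bool.false_eq_true, if_false]
    exact ih (fun y hy => hq y (by simp [hy]))

-- after the first corruption, A's stack keeps the prefix q0 ++ [c] forever
lemma foldA_post (rest : List Char) : ∀ (q0 : List Char) (c : Char) (s : List Char),
    (∀ x ∈ rest, preBr x = true) → preClose c = true →
    ∃ s', rest.foldl (fun acc sym => acc.bind (checkEnd sym)) (some (q0 ++ c :: s))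
          = some (q0 ++ c :: s') := by
  induction rest with
  | nil => intro q0 c s _ _; exact ⟨s, rfl⟩
  | cons sym rest ih =>
    intro q0 c s hbr hc
    have hsym : preBr sym = true := hbr sym (by simp)
    have hbr' : ∀ x ∈ rest, preBr x = true := fun x hx => hbr x (by simp [hx])
    simp only [List.foldl_cons, Option.bind_some]
    by_cases ho : preOpen sym = true
    · rw [show checkEnd sym (q0 ++ c :: s) = some (q0 ++ c :: (s ++ [sym])) by
        simp [checkEnd, open_isOpenA sym ho]]
      exact ih q0 c (s ++ [sym]) hbr' hc
    · have hcl : preClose sym = true := by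
        simp [preBr] at hsym; tauto
      cases s with
      | nil =>
        rw [show checkEnd sym (q0 ++ [c]) = some (q0 ++ c :: [sym]) by
          simp [checkEnd, close_not_openA sym hcl, bracesA_of_close sym hcl,
            List.getLast?_append,
            if_neg (close_ne_open c (preMatch sym) hc (preMatch_open sym hcl))]]
        exact ih q0 c [sym] hbr' hc
      | cons s0 stl =>
        have hlast : (q0 ++ c :: s0 :: stl).getLast? = some ((s0 :: stl).getLast (by simp)) := by
          rw [List.getLast?_append_of_ne_nil (l₁ := q0) (by simp)]
          simp [List.getLast?_eq_some_getLast]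
        by_cases hm : (s0 :: stl).getLast (by simp) = preMatch sym
        · rw [show checkEnd sym (q0 ++ c :: s0 :: stl) = some (q0 ++ c :: (s0 :: stl).dropLast) by
            simp only [checkEnd, close_not_openA sym hcl, Bool.false_eq_true, if_false, hlast,
              bracesA_of_close sym hcl, if_pos hm]
            rw [show q0 ++ c :: s0 :: stl = (q0 ++ [c]) ++ s0 :: stl by simp,
              List.dropLast_append_of_ne_nil (by simp)]
            simp]
          exact ih q0 c ((s0 :: stl).dropLast) hbr' hc
        · rw [show checkEnd sym (q0 ++ c :: s0 :: stl) = some (q0 ++ c :: (s0 :: stl ++ [sym])) by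
            simp only [checkEnd, close_not_openA sym hcl, Bool.false_eq_true, if_false, hlast,
              bracesA_of_close sym hcl, if_neg hm]
            simp]
          exact ih q0 c (s0 :: stl ++ [sym]) hbr' hc

-- the per-line equivalence, with A's stack = reverse of B's stack (all openers) before corruption
lemma line_eq (code : List Char) : ∀ (stk : List Char),
    safeLine code stk = true → (∀ x ∈ stk, preOpen x = true) →
    (match code.foldl (fun acc sym => acc.bind (checkEnd sym)) (some stk.reverse) with
      | none => 0
      | some lst => scanCloseA lst) = lineB code stk := by
  induction code with
  | nil =>
    intro stk _ hstk
    simp only [List.foldl_nil, lineB]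
    exact scanCloseA_all_openers _ (fun x hx => hstk x (List.mem_reverse.mp hx))
  | cons sym rest ih =>
    intro stk hsafe hstk
    simp only [List.foldl_cons, Option.bind_some]
    by_cases ho : preOpen sym = true
    · rw [show checkEnd sym stk.reverse = some ((sym :: stk).reverse) by
        simp [checkEnd, open_isOpenA sym ho]]
      rw [show lineB (sym :: rest) stk = lineB rest (sym :: stk) by
        have := ho; simp only [preOpen] at this; simp [lineB, this]]
      have hsafe' : safeLine rest (sym :: stk) = true := by
        simpa [safeLine, ho] using hsafe
      exact ih (sym :: stk) hsafe' (by
        intro x hx; rcases List.mem_cons.mp hx with h | h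
        · subst h; exact ho
        · exact hstk x h)
    · by_cases hcl : preClose sym = true
      · cases stk with
        | nil => simp [safeLine, ho, hcl] at hsafe
        | cons t stk' =>
          have ht : preOpen t = true := hstk t (by simp)
          have hlast : ((t :: stk').reverse).getLast? = some t := by
            simp [List.getLast?_reverse]
          by_cases hm : t = preMatch sym
          · rw [show checkEnd sym ((t :: stk').reverse) = some stk'.reverse by
              simp only [checkEnd, close_not_openA sym hcl, Bool.false_eq_true, if_false, hlast,
                bracesA_of_close sym hcl, if_pos hm]
              rw [show (t :: stk').reverse = stk'.reverse ++ [t] by simp, List.dropLast_concat]]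
            rw [show lineB (sym :: rest) (t :: stk') = lineB rest stk' by
              have hno := ho; simp only [preOpen] at hno
              simp [lineB, hno, pairsB_of_close sym hcl, hm]]
            have hsafe' : safeLine rest stk' = true := by
              simpa [safeLine, ho, hcl, hm] using hsafe
            exact ih stk' hsafe' (fun x hx => hstk x (by simp [hx]))
          · have hrest : rest.all preBr = true := by
              simpa [safeLine, ho, hcl, hm] using hsafe
            rw [show checkEnd sym ((t :: stk').reverse) = some ((t :: stk').reverse ++ [sym]) by
              simp only [checkEnd, close_not_openA sym hcl, Bool.false_eq_true, if_false, hlast,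
                bracesA_of_close sym hcl, if_neg hm]]
            obtain ⟨s', hs'⟩ := foldA_post rest ((t :: stk').reverse) sym []
              (fun x hx => (List.all_eq_true.mp hrest) x hx) hcl
            rw [show (t :: stk').reverse ++ [sym] = (t :: stk').reverse ++ sym :: [] by simp, hs']
            rw [show lineB (sym :: rest) (t :: stk') = pvPointsB sym by
              have hno := ho; simp only [preOpen] at hno
              simp [lineB, hno, pairsB_of_close sym hcl, hm]]
            have hscan : scanCloseA ((t :: stk').reverse ++ sym :: s') = pvPointsA sym :=
              scanCloseA_openers _ (fun x hx => hstk x (List.mem_reverse.mp hx)) sym s' hcl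
            show scanCloseA ((t :: stk').reverse ++ sym :: s') = pvPointsB sym
            rw [hscan]
            have := hcl; simp only [preClose] at this
            rcases (by simp at this; tauto : sym = ')' ∨ sym = ']' ∨ sym = '}' ∨ sym = '>')
              with h | h | h | h <;> subst h <;> decide
      · simp [safeLine, ho, hcl] at hsafe

lemma lineA_eq_lineB (code : List Char) (h : safeLine code [] = true) :
    lineA code = lineB code [] := by
  have := line_eq code [] h (by simp)
  simpa [lineA] using this

lemma fold_both (lines : List String) : ∀ (init : Int),
    (∀ code ∈ lines, safeLine code.toList [] = true) →
    lines.foldl (fun wrg_end code => wrg_end + lineA code.toList) init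
      = lines.foldl (fun total code => total + lineB code.toList []) init := by
  induction lines with
  | nil => intro init _; rfl
  | cons code rest ih =>
    intro init hall
    simp only [List.foldl_cons]
    rw [lineA_eq_lineB code.toList (hall code (by simp))]
    exact ih _ (fun c hc => hall c (by simp [hc]))

-- ===== VERDICT (by name: the statement is the Claim_ definition above) =====
theorem DayOne_spec : Claim_equal_DayOne := by
  intro lines _ hpre
  unfold Spec_DayOne DayOne DayOne_alt
  exact fold_both lines 0 hpre
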